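-- pv_equiv track=rewrite | github.com/partrita/pyAAscan | pyAAscan.py | GCClampCount
-- ===== SOURCE A (Python) =====
-- def GCClampCount(primer, reverse=False):
--     '''
--     count how many residues from the end the first non-GC is found
--     combination of the orignial GCClampScore and GCClampScoreRC2 functions,
--     use reverse=False for GCClampScore and reverse=True for GCClampScoreRC2
--     '''
--     result=0
--     # go through in reverse order if reverse is True
--     rev = -1
--     if reverse:
--         rev = 1
--     for i in primer[::rev]:
--         if i in ['g','G','c','C']:
--             result+=1
--         else:
--             return result
--     return result
-- ===== SOURCE B (Python) =====
-- def GCClampCount(primer, reverse=False):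
--     # closed form: clamp length = total length minus length after stripping
--     # G/C characters from the scanned end (end of string, or start if reverse)
--     if reverse:
--         return len(primer) - len(primer.lstrip('gGcC'))
--     return len(primer) - len(primer.rstrip('gGcC'))
-- ===== Notes on version B (the rewrite author's own statement) =====
-- stated objective: idiomatic
-- what changed: Replaced the explicit reversed-iteration early-exit loop with a closed-form length difference after stripping the G/C character set from the scanned end (lstrip for reverse=True, rstrip for reverse=False).
import Mathlib
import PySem

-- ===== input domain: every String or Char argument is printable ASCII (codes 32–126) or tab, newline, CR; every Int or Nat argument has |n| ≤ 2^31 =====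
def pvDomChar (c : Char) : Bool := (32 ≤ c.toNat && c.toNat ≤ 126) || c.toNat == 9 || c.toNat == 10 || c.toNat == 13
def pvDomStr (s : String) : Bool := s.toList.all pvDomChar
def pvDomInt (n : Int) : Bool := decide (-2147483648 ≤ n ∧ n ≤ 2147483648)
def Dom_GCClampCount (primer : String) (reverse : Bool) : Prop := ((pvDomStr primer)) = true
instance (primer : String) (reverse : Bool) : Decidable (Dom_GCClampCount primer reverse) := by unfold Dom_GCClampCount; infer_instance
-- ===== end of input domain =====

-- B (idiomatic): replaces A's early-exit reversed-iteration loop with a closed-form length difference after stripping G/C characters from the scanned end; same O(n) cost.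


-- ===== PORT A =====
-- early-exit loop: returns r on the first non-G/C character
def pvLoopA : List Char → Int → Int
  | [], r => r
  | c :: t, r => if c ∈ ['g','G','c','C'] then pvLoopA t (r + 1) else r

-- primer[::rev] with rev = 1 (reverse=True) keeps the string, rev = -1 reverses it (exact)
def GCClampCount (primer : String) (reverse : Bool) : Int :=
  pvLoopA (if reverse then primer.toList else primer.toList.reverse) 0

-- ===== PORT B =====
def pvIsGC (c : Char) : Bool := c == 'g' || c == 'G' || c == 'c' || c == 'C'

-- lstrip('gGcC') = dropWhile pvIsGC; rstrip = the same on the reversed char list (exact)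
def GCClampCount_alt (primer : String) (reverse : Bool) : Int :=
  let s := primer.toList
  if reverse then (s.length : Int) - ((s.dropWhile pvIsGC).length : Int)
  else (s.length : Int) - (((s.reverse.dropWhile pvIsGC).reverse).length : Int)

-- ===== PRECONDITION & SPEC =====
def Spec_GCClampCount (primer : String) (reverse : Bool) (out : Int) : Prop := out = GCClampCount_alt primer reverse
instance (primer : String) (reverse : Bool) (out : Int) : Decidable (Spec_GCClampCount primer reverse out) := by unfold Spec_GCClampCount; infer_instance

-- ===== CLAIM (what is proved, stated in full; the proofs are below) =====
def Claim_equal_GCClampCount : Prop := ∀ (primer : String) (reverse : Bool), Dom_GCClampCount primer reverse → Spec_GCClampCount primer reverse (GCClampCount primer reverse)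

-- ===== LEMMAS AND PROOFS =====

theorem pvLoopA_eq (l : List Char) (r : Int) :
    pvLoopA l r = r + ((l.takeWhile pvIsGC).length : Int) := by
  induction l generalizing r with
  | nil => simp [pvLoopA, List.takeWhile]
  | cons c t ih =>
    by_cases h : pvIsGC c
    · have hm : c ∈ ['g','G','c','C'] := by
        simp [pvIsGC] at h
        simp only [List.mem_cons, List.not_mem_nil, or_false]
        tauto
      simp [pvLoopA, List.takeWhile, h, hm, ih]
      omega
    · have hm : c ∉ ['g','G','c','C'] := by
        simp [pvIsGC] at h
        simp only [List.mem_cons, List.not_mem_nil, or_false]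
        tauto
      simp [pvLoopA, List.takeWhile, h, hm]

theorem pvDrop_take (l : List Char) :
    ((l.dropWhile pvIsGC).length : Int) = (l.length : Int) - ((l.takeWhile pvIsGC).length : Int) := by
  have h := List.takeWhile_append_dropWhile (p := pvIsGC) (l := l)
  have : (l.takeWhile pvIsGC).length + (l.dropWhile pvIsGC).length = l.length := by
    have h2 := congrArg List.length h
    rw [List.length_append] at h2
    exact h2
  omega

-- ===== VERDICT (by name: the statement is the Claim_ definition above) =====
theorem GCClampCount_spec : Claim_equal_GCClampCount := by
  intro primer reverse _
  unfold Spec_GCClampCount GCClampCount GCClampCount_alt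
  cases reverse <;> simp [pvLoopA_eq, pvDrop_take]
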